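-- pv_equiv track=rewrite | github.com/AlexSkrivseth/python_scripts | Codility/missingnum.py | solution
-- ===== SOURCE A (Python) =====
-- def solution(A):
--     # write your code in Python 3.6
--     if len(A) == 0:
--         return 1
--     elif len(A) == 1:
--         return 1
--
--     A.sort()
--     for index, num in enumerate(A):
--         if index+1 == len(A):
--             return 1
--
--         if A[index+1] != num+1:
--             return num+1
-- ===== SOURCE B (Python) =====
-- def solution(A):
--     # count-dictionary walk from min(A) instead of sort+scan; note: A sorts its argument in place, B does not.
--     if len(A) < 2:
--         return 1
--     counts = {}
--     for x in A:
--         counts[x] = counts.get(x, 0) + 1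
--     m = min(A)
--     v = m
--     while counts[v] == 1 and (v + 1) in counts:
--         v += 1
--     if counts[v] == 1 and v - m + 1 == len(A):
--         return 1
--     return v + 1
-- ===== Notes on version B (the rewrite author's own statement) =====
-- stated objective: alternative
-- what changed: Replaces sort-then-adjacent-scan with a hash-count pass plus a walk from min(A) that stops at the first value that is duplicated or whose successor is absent; it trades the sort for a dictionary build and a value walk.
import Mathlib
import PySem

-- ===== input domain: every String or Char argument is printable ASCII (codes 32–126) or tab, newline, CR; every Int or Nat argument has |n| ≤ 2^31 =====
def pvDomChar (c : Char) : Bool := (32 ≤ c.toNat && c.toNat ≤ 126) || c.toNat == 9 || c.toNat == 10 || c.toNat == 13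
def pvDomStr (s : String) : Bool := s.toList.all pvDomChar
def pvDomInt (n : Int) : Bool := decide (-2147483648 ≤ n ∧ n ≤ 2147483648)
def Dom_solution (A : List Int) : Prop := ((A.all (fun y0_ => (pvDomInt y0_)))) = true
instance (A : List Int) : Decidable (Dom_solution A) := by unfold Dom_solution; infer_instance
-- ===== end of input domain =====

-- B replaces A's sort + adjacent scan with a count dictionary and a walk from min(A) that stops
-- at the first duplicated value or missing successor; equivalence is about the RETURN value only
-- (A sorts its argument in place, B does not mutate it).

-- ===== PORT A =====
-- the 'for index, num in enumerate(A)' body: at the last element return 1, else compare A[index+1] with num+1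
def solutionLoop : List Int → Int
  | [] => 1            -- never reached: the loop is only entered with len(A) ≥ 2
  | [_] => 1           -- index+1 == len(A)
  | a :: b :: rest => if b ≠ a + 1 then a + 1 else solutionLoop (b :: rest)

def solution (A : List Int) : Int :=
  if A.length = 0 then 1
  else if A.length = 1 then 1
  else solutionLoop (PySem.List.sorted A (fun x => x))

-- ===== PORT B =====
-- the 'while counts[v] == 1 and (v + 1) in counts: v += 1' loop; fuel A.length is a totality
-- guard only (the walk advances at most once per distinct element of A)
def solutionWalk (counts : PySem.Dict Int Int) : Nat → Int → Int
  | 0, v => v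
  | n + 1, v =>
    if counts.getD v 0 == 1 && counts.contains (v + 1) then solutionWalk counts n (v + 1) else v

def solution_alt (A : List Int) : Int :=
  if A.length < 2 then 1
  else
    let counts := A.foldl (fun d x => d.insert x (d.getD x 0 + 1)) PySem.Dict.empty
    let m := (PySem.List.min? A (fun x => x)).getD 0   -- A nonempty here, so min? is some
    let v := solutionWalk counts A.length m
    if counts.getD v 0 == 1 && v - m + 1 == (A.length : Int) then 1 else v + 1

-- ===== PRECONDITION & SPEC =====
def Spec_solution (A : List Int) (out : Int) : Prop := out = solution_alt A
instance (A : List Int) (out : Int) : Decidable (Spec_solution A out) := by unfold Spec_solution; infer_instance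

-- ===== CLAIM (what is proved, stated in full; the proofs are below) =====
def Claim_equal_solution : Prop := ∀ (A : List Int), Dom_solution A → Spec_solution A (solution A)

-- ===== LEMMAS AND PROOFS =====

-- proof-side form of the walk, over List.count of the input list
def walkC (s : List Int) : Nat → Int → Int
  | 0, v => v
  | n + 1, v => if s.count v = 1 ∧ s.count (v + 1) ≠ 0 then walkC s n (v + 1) else v

lemma solutionWalk_eq_walkC (s : List Int) (n : Nat) (v : Int) :
    solutionWalk (PySem.Dict.counter s) n v = walkC s n v := by
  induction n generalizing v with
  | zero => rfl
  | succ n ih =>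
      simp only [solutionWalk, walkC, PySem.Dict.getD_counter, PySem.Dict.contains_counter]
      by_cases h1 : s.count v = 1 <;> by_cases h2 : s.count (v + 1) ≠ 0 <;>
        simp [h1, h2, List.count_pos_iff.symm, Nat.pos_iff_ne_zero, ih]

lemma le_walkC (s : List Int) (n : Nat) (v : Int) : v ≤ walkC s n v := by
  induction n generalizing v with
  | zero => simp [walkC]
  | succ n ih =>
      simp only [walkC]
      split
      · exact le_trans (by omega) (ih (v + 1))
      · exact le_rfl

lemma walkC_congr (s t : List Int) (n : Nat) (v : Int)
    (h : ∀ k, v ≤ k → s.count k = t.count k) :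
    walkC s n v = walkC t n v := by
  induction n generalizing v with
  | zero => rfl
  | succ n ih =>
      simp only [walkC, h v le_rfl, h (v + 1) (by omega)]
      split
      · exact ih (v + 1) (fun k hk => h k (by omega))
      · rfl

lemma count_head_eq_one (a : Int) (t : List Int) (hlt : ∀ x ∈ t, a < x) :
    (a :: t).count a = 1 := by
  have h0 : t.count a = 0 := List.count_eq_zero.mpr (fun hm => lt_irrefl a (hlt a hm))
  simp [List.count_cons_self, h0]

lemma count_eq_zero_of_forall_lt (k : Int) (t : List Int) (hlt : ∀ x ∈ t, k < x ∨ x < k) :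
    t.count k = 0 :=
  List.count_eq_zero.mpr (fun hm => by rcases hlt k hm with h | h <;> exact lt_irrefl k h)

set_option maxHeartbeats 1000000 in
-- the heart: on a nondecreasing list of length ≥ 2, A's adjacent scan equals B's count walk
lemma loop_eq_walk (rest : List Int) (a b : Int)
    (hs : (a :: b :: rest).Pairwise (· ≤ ·)) :
    solutionLoop (a :: b :: rest) =
      (let s := a :: b :: rest
       let v := walkC s s.length a
       if s.count v = 1 ∧ v - a + 1 = (s.length : Int) then 1 else v + 1) := by
  induction rest generalizing a b with
  | nil =>
      have hab : a ≤ b := List.rel_of_pairwise_cons hs (by simp)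
      simp only [solutionLoop, List.length_cons, List.length_nil, walkC]
      by_cases hb : b = a + 1
      · subst hb
        have h1 : ([a, a + 1] : List Int).count a = 1 := by
          rw [List.count_cons_self, List.count_cons_of_ne (by omega), List.count_nil]
        have h2 : ([a, a + 1] : List Int).count (a + 1) = 1 := by
          rw [List.count_cons_of_ne (by omega), List.count_cons_self, List.count_nil]
        have h3 : ([a, a + 1] : List Int).count (a + 1 + 1) = 0 := by
          rw [List.count_cons_of_ne (by omega), List.count_cons_of_ne (by omega), List.count_nil]
        rw [if_neg (not_not_intro (rfl : a + 1 = a + 1))]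
        rw [if_pos (⟨h1, by simp⟩ :
          List.count a [a, a + 1] = 1 ∧ List.count (a + 1) [a, a + 1] ≠ 0)]
        rw [if_neg (fun h : List.count (a + 1) [a, a + 1] = 1 ∧
          List.count (a + 1 + 1) [a, a + 1] ≠ 0 => h.2 h3)]
        rw [if_pos (⟨h2, by push_cast; omega⟩ :
          List.count (a + 1) [a, a + 1] = 1 ∧ a + 1 - a + 1 = ((0 + 1 + 1 : Nat) : Int))]
      · have hC1 : ¬(([a, b] : List Int).count a = 1 ∧ ([a, b] : List Int).count (a + 1) ≠ 0) := by
          rintro ⟨h1, h2⟩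
          by_cases hba : b = a
          · subst hba; rw [List.count_cons_self, List.count_cons_self, List.count_nil] at h1; omega
          · refine h2 ?_
            rw [List.count_cons_of_ne (by omega), List.count_cons_of_ne (by omega), List.count_nil]
        rw [if_neg hC1, if_pos hb]
        rw [if_neg (fun h : List.count a [a, b] = 1 ∧ a - a + 1 = ((0 + 1 + 1 : Nat) : Int) =>
          by have h2 := h.2; push_cast at h2; omega)]
  | cons c rest' ih =>
      have htail : (b :: c :: rest').Pairwise (· ≤ ·) := (List.pairwise_cons.mp hs).2
      have hble : ∀ x ∈ c :: rest', b ≤ x := (List.pairwise_cons.mp htail).1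
      have hmemle : ∀ x ∈ b :: c :: rest', b ≤ x := by
        intro x hx
        rcases List.mem_cons.mp hx with h | h
        · exact le_of_eq h.symm
        · exact hble x h
      have hab : a ≤ b := (List.pairwise_cons.mp hs).1 b (by simp)
      by_cases hb : b = a + 1
      · -- chain continues: a, then b = a+1
        subst hb
        have hc1 : (a :: (a + 1) :: c :: rest').count a = 1 :=
          count_head_eq_one a _ (fun x hx => lt_of_lt_of_le (by omega) (hmemle x hx))
        have hcb : (a :: (a + 1) :: c :: rest').count (a + 1) ≠ 0 := by
          simp [List.count_eq_zero]
        have hstep : walkC (a :: (a + 1) :: c :: rest') (rest'.length + 2 + 1) a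
            = walkC (a :: (a + 1) :: c :: rest') (rest'.length + 2) (a + 1) := by
          simp only [walkC]
          rw [if_pos (⟨hc1, hcb⟩ : (a :: (a + 1) :: c :: rest').count a = 1 ∧
            (a :: (a + 1) :: c :: rest').count (a + 1) ≠ 0)]
        have hcongr : walkC (a :: (a + 1) :: c :: rest') (rest'.length + 2) (a + 1)
            = walkC ((a + 1) :: c :: rest') (rest'.length + 2) (a + 1) := by
          apply walkC_congr
          intro k hk
          exact List.count_cons_of_ne (by omega)
        have hIH := ih (a + 1) c htail
        simp only [List.length_cons] at hIH ⊢
        set v := walkC ((a + 1) :: c :: rest') (rest'.length + 2) (a + 1)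
        have hvge : a + 1 ≤ v := le_walkC _ _ _
        have hcv : (a :: (a + 1) :: c :: rest').count v = ((a + 1) :: c :: rest').count v :=
          List.count_cons_of_ne (by omega)
        have hLHS : solutionLoop (a :: (a + 1) :: c :: rest')
            = solutionLoop ((a + 1) :: c :: rest') := by
          simp [solutionLoop]
        rw [hLHS, hIH]
        simp only [hstep, hcongr, hcv]
        by_cases hcond : ((a + 1) :: c :: rest').count v = 1 ∧
            v - (a + 1) + 1 = ((rest'.length + 1 + 1 : Nat) : Int)
        · rw [if_pos hcond]
          rw [if_pos (⟨hcond.1, by have h2 := hcond.2; push_cast at h2 ⊢; omega⟩ :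
            ((a + 1) :: c :: rest').count v = 1 ∧
              v - a + 1 = ((rest'.length + 1 + 1 + 1 : Nat) : Int))]
        · rw [if_neg hcond]
          rw [if_neg (fun h : ((a + 1) :: c :: rest').count v = 1 ∧
              v - a + 1 = ((rest'.length + 1 + 1 + 1 : Nat) : Int) =>
            hcond ⟨h.1, by have h2 := h.2; push_cast at h2 ⊢; omega⟩)]
      · -- chain breaks immediately at a: b is a duplicate of a or leaves a gap
        have hLHS : solutionLoop (a :: b :: c :: rest') = a + 1 := by
          simp [solutionLoop, hb]
        have hnostep : ¬((a :: b :: c :: rest').count a = 1 ∧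
            (a :: b :: c :: rest').count (a + 1) ≠ 0) := by
          rintro ⟨h1, h2⟩
          by_cases hba : b = a
          · subst hba; rw [List.count_cons_self, List.count_cons_self] at h1; omega
          · have hab2 : a + 1 < b := by omega
            refine h2 (count_eq_zero_of_forall_lt _ _ (fun x hx => ?_))
            rcases List.mem_cons.mp hx with h | hx2
            · right; omega
            · rcases List.mem_cons.mp hx2 with h | h
              · left; omega
              · left; exact lt_of_lt_of_le hab2 (hble x h)
        have hstop : walkC (a :: b :: c :: rest') (rest'.length + 2 + 1) a = a := by
          simp only [walkC]
          rw [if_neg hnostep]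
        simp only [List.length_cons, hLHS, hstop]
        rw [if_neg (fun h : (a :: b :: c :: rest').count a = 1 ∧
            a - a + 1 = ((rest'.length + 1 + 1 + 1 : Nat) : Int) =>
          by have h2 := h.2; push_cast at h2; omega)]

-- ===== VERDICT (by name: the statement is the Claim_ definition above) =====
set_option maxHeartbeats 1000000 in
theorem solution_spec : Claim_equal_solution := by
  unfold Claim_equal_solution Spec_solution
  intro A _
  match A with
  | [] => rfl
  | [x] => rfl
  | x :: y :: ys =>
    have hlenA : (x :: y :: ys).length = ys.length + 2 := by simp
    have hperm : (PySem.List.sorted (x :: y :: ys) (fun z => z)).Perm (x :: y :: ys) :=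
      PySem.List.sorted_perm _ _ _
    have hlen : (PySem.List.sorted (x :: y :: ys) (fun z => z)).length = ys.length + 2 := by
      rw [hperm.length_eq, hlenA]
    obtain ⟨a, b, rest, hsr⟩ : ∃ a b rest,
        PySem.List.sorted (x :: y :: ys) (fun z => z) = a :: b :: rest := by
      cases hS : PySem.List.sorted (x :: y :: ys) (fun z => z) with
      | nil => rw [hS] at hlen; simp at hlen
      | cons a t =>
        cases t with
        | nil => rw [hS] at hlen; simp at hlen
        | cons b rest => exact ⟨a, b, rest, rfl⟩
    -- the min of A is the head of sorted(A)
    obtain ⟨m, hm⟩ : ∃ m, PySem.List.min? (x :: y :: ys) (fun z => z) = some m :=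
      ⟨_, PySem.List.min?_id_cons ..⟩
    have hma : m = a := by
      have h1 : a ≤ m := PySem.List.key_head_sorted_le _ _ hsr m (PySem.List.min?_mem hm)
      have h2 : m ≤ a := PySem.List.min?_isMin hm a (hperm.subset (by rw [hsr]; simp))
      omega
    have hpair : (a :: b :: rest).Pairwise (· ≤ ·) := by
      have := PySem.List.sorted_pairwise (x :: y :: ys) (fun z => z)
      rwa [hsr] at this
    have hslen : (a :: b :: rest).length = ys.length + 2 := by rw [← hsr, hlen]
    -- reduce port A
    have hA : solution (x :: y :: ys) = solutionLoop (a :: b :: rest) := by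
      rw [solution, if_neg (by simp), if_neg (by simp), hsr]
    -- reduce port B
    have hcountAB : ∀ k : Int, (x :: y :: ys).count k = (a :: b :: rest).count k := by
      intro k
      rw [← hsr]
      exact (hperm.count_eq k).symm
    have hwalk : solutionWalk (PySem.Dict.counter (x :: y :: ys)) (ys.length + 2) m
        = walkC (a :: b :: rest) (a :: b :: rest).length a := by
      rw [hma, solutionWalk_eq_walkC, hslen]
      exact walkC_congr _ _ _ _ (fun k _ => hcountAB k)
    have hB : solution_alt (x :: y :: ys)
        = (let s := a :: b :: rest
           let v := walkC s s.length a
           if s.count v = 1 ∧ v - a + 1 = (s.length : Int) then 1 else v + 1) := by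
      rw [solution_alt, if_neg (by simp)]
      simp only [PySem.Dict.foldl_insert_getD_add_one_eq_counter, hm, Option.getD_some,
        hlenA, hwalk, PySem.Dict.getD_counter, hcountAB]
      refine if_congr ?_ rfl rfl
      rw [hma, ← hslen]
      simp [Nat.cast_eq_one]
    rw [hA, hB]
    exact loop_eq_walk rest a b hpair
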